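-- pv_equiv track=rewrite | github.com/spitefully-positive/AdventOfCode | 2024/Day_5/day_5_2.py | correctPrintingTask
-- ===== SOURCE A (Python) =====
-- def checkRule(rules, fromPage, toPage):
--     for rule in rules:
--         if rule[0] == fromPage and rule[1] == toPage:
--                 return True
--     # Keine passende Regel gefunden
--     return False
--
-- def correctPrintingTask(rules, printingTask):
--     # Nachfolgeseiten für jede Seite im aktuellen Task
--     options = []
--     # Für jede Seite im aktuellen Auftrag
--     for currentPageIndex in range(len(printingTask)):
--         currentPageOptions = []
--         for potentialNextPage in range(len(printingTask)):
--             if checkRule(rules, printingTask[currentPageIndex], printingTask[potentialNextPage]):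
--                currentPageOptions.append(printingTask[potentialNextPage])
--         options.append([printingTask[currentPageIndex], currentPageOptions])
--     # ToDo
--     options_sorted = sorted(options, key=lambda x: len(x[1]))
--     return [entry[0] for entry in options_sorted]
-- ===== SOURCE B (Python) =====
-- def correctPrintingTask(rules, printingTask):
--     # multiplicity of each page in the task
--     count = {}
--     for p in printingTask:
--         count[p] = count.get(p, 0) + 1
--     # rule index: fromPage -> set of its toPages
--     succ = {}
--     for r in rules:
--         succ.setdefault(r[0], set()).add(r[1])
--     # stable sort of the pages by how many task entries are rule-successors
--     return sorted(printingTask,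
--                   key=lambda p: sum(count.get(b, 0) for b in succ.get(p, ())))
-- ===== Notes on version B (the rewrite author's own statement) =====
-- stated objective: faster
-- what changed: The nested task-by-task scan calling checkRule (a linear rule search) per pair is replaced by a page-multiplicity counter plus a fromPage-to-successor-set index built once, so each page's score is a count-weighted sum over its own rule successors; the stable sort then orders the task pages directly.
-- outside the precondition, e.g. on correctPrintingTask([[1, 1], [1]], [1]): A returns [1], B raises IndexError; on correctPrintingTask([[1]], [2]): A returns [2], B raises IndexError
import Mathlib
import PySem

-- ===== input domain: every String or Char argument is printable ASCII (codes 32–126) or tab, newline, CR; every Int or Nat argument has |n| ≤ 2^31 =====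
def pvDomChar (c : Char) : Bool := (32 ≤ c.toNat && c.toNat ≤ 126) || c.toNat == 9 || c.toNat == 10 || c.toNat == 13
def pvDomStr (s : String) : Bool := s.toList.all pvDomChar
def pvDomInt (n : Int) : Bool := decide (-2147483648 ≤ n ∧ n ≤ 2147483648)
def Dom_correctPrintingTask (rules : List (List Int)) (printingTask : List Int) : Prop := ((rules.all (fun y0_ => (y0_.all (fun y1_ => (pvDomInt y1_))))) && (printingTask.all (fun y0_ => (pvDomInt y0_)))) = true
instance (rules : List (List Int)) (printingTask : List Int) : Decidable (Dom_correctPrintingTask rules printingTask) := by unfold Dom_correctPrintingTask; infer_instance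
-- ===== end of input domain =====

-- B replaces A's nested task×task scan (with a linear rule search per pair) by a task counter plus a
-- fromPage→successor-set index built once; measured faster (asymptotic: O(t²·r) → O(r + t·s + t log t)).

-- ===== PORT A =====
def checkRule (rules : List (List Int)) (fromPage toPage : Int) : Bool :=
  match rules with
  | [] => false
  | rule :: rest =>
    match PySem.List.pyGet? rule 0 with
    | none => false  -- rule[0] IndexError; excluded by Pre_
    | some a =>
      if a = fromPage then
        match PySem.List.pyGet? rule 1 with
        | none => false  -- rule[1] IndexError; excluded by Pre_
        | some b => if b = toPage then true else checkRule rest fromPage toPage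
      else checkRule rest fromPage toPage

def correctPrintingTask (rules : List (List Int)) (printingTask : List Int) : List Int :=
  let options := (PySem.List.pyRange 0 (PySem.List.len printingTask)).foldl
    (fun acc currentPageIndex =>
      let page := PySem.List.pyGetD printingTask currentPageIndex 0
      let currentPageOptions := (PySem.List.pyRange 0 (PySem.List.len printingTask)).foldl
        (fun acc2 potentialNextPage =>
          if checkRule rules page (PySem.List.pyGetD printingTask potentialNextPage 0)
          then acc2 ++ [PySem.List.pyGetD printingTask potentialNextPage 0] else acc2) []
      acc ++ [(page, currentPageOptions)]) ([] : List (Int × List Int))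
  (PySem.List.sorted options (fun x => (x.2.length : Int))).map Prod.fst

-- ===== PORT B =====
def correctPrintingTask_alt (rules : List (List Int)) (printingTask : List Int) : List Int :=
  let count : PySem.Dict Int Int :=
    printingTask.foldl (fun d p => d.insert p (d.getD p 0 + 1)) PySem.Dict.empty
  let succ : PySem.Dict Int (PySem.Set Int) :=
    rules.foldl (fun d r =>
      d.insert (PySem.List.pyGetD r 0 0)
        (PySem.Set.add (d.getD (PySem.List.pyGetD r 0 0) PySem.Set.empty)
          (PySem.List.pyGetD r 1 0))) PySem.Dict.empty
  PySem.List.sorted printingTask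
    (fun p => ((succ.getD p PySem.Set.empty).map (fun b => count.getD b 0)).sum)

-- ===== PRECONDITION & SPEC =====
-- Pre_ requires every rule to have at least two entries: on shorter rules A raises IndexError whenever
-- the rule's (possibly missing) first entry matches a checked page pair before an earlier rule decides it
-- (and returns only accidentally otherwise, depending on rule order), while B always raises there.
def Pre_correctPrintingTask (rules : List (List Int)) (printingTask : List Int) : Prop :=
  ∀ r ∈ rules, 2 ≤ r.length
instance (rules : List (List Int)) (printingTask : List Int) : Decidable (Pre_correctPrintingTask rules printingTask) := by unfold Pre_correctPrintingTask; infer_instance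

def pvWitness_correctPrintingTask : List (List Int) × List Int := ([[1, 2], [2, 3]], [3, 2, 1])

def Spec_correctPrintingTask (rules : List (List Int)) (printingTask : List Int) (out : List Int) : Prop := out = correctPrintingTask_alt rules printingTask
instance (rules : List (List Int)) (printingTask : List Int) (out : List Int) : Decidable (Spec_correctPrintingTask rules printingTask out) := by unfold Spec_correctPrintingTask; infer_instance

-- ===== CLAIM (what is proved, stated in full; the proofs are below) =====
def Claim_equal_correctPrintingTask : Prop := ∀ (rules : List (List Int)) (printingTask : List Int), Dom_correctPrintingTask rules printingTask → Pre_correctPrintingTask rules printingTask → Spec_correctPrintingTask rules printingTask (correctPrintingTask rules printingTask)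

-- ===== LEMMAS AND PROOFS =====

def ruleFrom (r : List Int) : Int := PySem.List.pyGetD r 0 0
def ruleTo (r : List Int) : Int := PySem.List.pyGetD r 1 0

-- the toPages of the rules whose fromPage is p, in rule order
def succList (rules : List (List Int)) (p : Int) : List Int :=
  (rules.filter (fun r => ruleFrom r = p)).map ruleTo

lemma succ_fold (rules : List (List Int)) (d : PySem.Dict Int (PySem.Set Int)) (p : Int) :
    (rules.foldl (fun d r =>
      d.insert (PySem.List.pyGetD r 0 0)
        (PySem.Set.add (d.getD (PySem.List.pyGetD r 0 0) PySem.Set.empty)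
          (PySem.List.pyGetD r 1 0))) d).getD p PySem.Set.empty
    = (succList rules p).foldl PySem.Set.add (d.getD p PySem.Set.empty) := by
  induction rules generalizing d with
  | nil => simp [succList]
  | cons r rest ih =>
    simp only [List.foldl_cons]
    rw [ih]
    by_cases hp : ruleFrom r = p
    · rw [show (d.insert (PySem.List.pyGetD r 0 0)
        (PySem.Set.add (d.getD (PySem.List.pyGetD r 0 0) PySem.Set.empty)
          (PySem.List.pyGetD r 1 0))).getD p PySem.Set.empty
        = PySem.Set.add (d.getD p PySem.Set.empty) (ruleTo r) from by
          rw [PySem.Dict.getD_insert]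
          simp only [ruleFrom] at hp
          rw [if_pos hp.symm, hp]
          rfl]
      simp [succList, hp]
    · rw [PySem.Dict.getD_insert, if_neg (fun hh => hp (by simp [ruleFrom, hh]))]
      simp [succList, hp]

lemma check_iff (rules : List (List Int)) (p q : Int) (h : ∀ r ∈ rules, 2 ≤ r.length) :
    checkRule rules p q = true ↔ ∃ r ∈ rules, ruleFrom r = p ∧ ruleTo r = q := by
  induction rules with
  | nil => simp [checkRule]
  | cons r rest ih =>
    have h2 : 2 ≤ r.length := h r (List.mem_cons_self)
    obtain ⟨x, y, t, rfl⟩ : ∃ x y t, r = x :: y :: t := by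
      match r, h2 with
      | x :: y :: t, _ => exact ⟨x, y, t, rfl⟩
    have hx : PySem.List.pyGet? (x :: y :: t) (0 : Int) = some x := by
      have h0 : (0:Int) ≤ (t.length:Int) + 1 := by omega
      simp [PySem.List.pyGet?, PySem.List.pyIdx?, h0]
    have hy : PySem.List.pyGet? (x :: y :: t) (1 : Int) = some y := by
      simp [PySem.List.pyGet?, PySem.List.pyIdx?]
    have hrf : ruleFrom (x :: y :: t) = x := by simp [ruleFrom, PySem.List.pyGetD]
    have hrt : ruleTo (x :: y :: t) = y := by simp [ruleTo, PySem.List.pyGetD]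
    have ih' := ih (fun r hr => h r (List.mem_cons_of_mem _ hr))
    rw [checkRule]
    simp only [hx, hy]
    by_cases hxp : x = p
    · rw [if_pos hxp]
      by_cases hyq : y = q
      · rw [if_pos hyq]
        constructor
        · intro _
          exact ⟨x :: y :: t, List.mem_cons_self, by rw [hrf, hxp], by rw [hrt, hyq]⟩
        · intro _
          rfl
      · rw [if_neg hyq, ih']
        constructor
        · rintro ⟨r, hr, hh⟩
          exact ⟨r, List.mem_cons_of_mem _ hr, hh⟩
        · rintro ⟨r, hr, hh⟩
          rcases List.mem_cons.mp hr with rfl | hr'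
          · rw [hrt] at hh
            exact absurd hh.2 hyq
          · exact ⟨r, hr', hh⟩
    · rw [if_neg hxp, ih']
      constructor
      · rintro ⟨r, hr, hh⟩
        exact ⟨r, List.mem_cons_of_mem _ hr, hh⟩
      · rintro ⟨r, hr, hh⟩
        rcases List.mem_cons.mp hr with rfl | hr'
        · rw [hrf] at hh
          exact absurd hh.1 hxp
        · exact ⟨r, hr', hh⟩

lemma countP_cons_mem (b : Int) (S : List Int) (hb : b ∉ S) (t : List Int) :
    t.countP (fun q => decide (q ∈ b :: S)) = t.count b + t.countP (fun q => decide (q ∈ S)) := by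
  induction t with
  | nil => simp
  | cons x t ih =>
    simp only [List.countP_cons, List.count_cons, ih]
    by_cases hxb : x = b
    · subst hxb
      simp [hb]
      omega
    · by_cases hxs : x ∈ S <;> simp [hxb, hxs] <;> omega

lemma sum_count_eq_countP (S : List Int) (hS : S.Nodup) (t : List Int) :
    (S.map (fun b => ((t.count b : Nat) : Int))).sum = (t.countP (fun q => decide (q ∈ S)) : Int) := by
  induction S with
  | nil => simp
  | cons b S ih =>
    have hb : b ∉ S := (List.nodup_cons.mp hS).1
    rw [countP_cons_mem b S hb t]
    simp only [List.map_cons, List.sum_cons, ih (List.nodup_cons.mp hS).2]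
    push_cast
    ring

lemma insertBy_map {α β : Type} (g : α → β) (bf : α → α → Bool) (bg : β → β → Bool)
    (h : ∀ x y, bg (g x) (g y) = bf x y) (x : α) (ys : List α) :
    PySem.List.insertBy bg (g x) (ys.map g) = (PySem.List.insertBy bf x ys).map g := by
  induction ys with
  | nil => rfl
  | cons y ys ih =>
    simp only [List.map_cons, PySem.List.insertBy, h]
    by_cases hb : bf x y
    · simp [hb]
    · simp [hb, ih]

lemma sorted_map_comm {α β : Type} (g : α → β) (k : β → Int) (l : List α) :
    PySem.List.sorted (l.map g) k = (PySem.List.sorted l (fun x => k (g x))).map g := by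
  rw [PySem.List.sorted_eq_foldl_insertBy, PySem.List.sorted_eq_foldl_insertBy]
  have main : ∀ (l : List α) (acc : List α),
      (l.map g).foldl (fun acc x => PySem.List.insertBy (fun a b => decide (k a < k b)) x acc) (acc.map g)
      = (l.foldl (fun acc x => PySem.List.insertBy (fun a b => decide (k (g a) < k (g b))) x acc) acc).map g := by
    intro l
    induction l with
    | nil => intro acc; rfl
    | cons x l ih =>
      intro acc
      simp only [List.map_cons, List.foldl_cons]
      rw [insertBy_map g (fun a b => decide (k (g a) < k (g b))) (fun a b => decide (k a < k b)) (fun _ _ => rfl), ih]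
  exact main l []

lemma innerA (rules : List (List Int)) (task : List Int) (page : Int) :
    (PySem.List.pyRange 0 (PySem.List.len task)).foldl
      (fun acc2 potentialNextPage =>
        if checkRule rules page (PySem.List.pyGetD task potentialNextPage 0)
        then acc2 ++ [PySem.List.pyGetD task potentialNextPage 0] else acc2) []
    = task.filter (fun q => checkRule rules page q) := by
  rw [PySem.List.foldl_pyRange_zero_pyGetD task 0
    (fun acc2 q => if checkRule rules page q then acc2 ++ [q] else acc2) []]
  rw [PySem.List.foldl_append_if_eq_filter]
  rfl

lemma optionsA (rules : List (List Int)) (task : List Int) :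
    (PySem.List.pyRange 0 (PySem.List.len task)).foldl
      (fun acc currentPageIndex =>
        let page := PySem.List.pyGetD task currentPageIndex 0
        let currentPageOptions := (PySem.List.pyRange 0 (PySem.List.len task)).foldl
          (fun acc2 potentialNextPage =>
            if checkRule rules page (PySem.List.pyGetD task potentialNextPage 0)
            then acc2 ++ [PySem.List.pyGetD task potentialNextPage 0] else acc2) []
        acc ++ [(page, currentPageOptions)]) ([] : List (Int × List Int))
    = task.map (fun page => (page, task.filter (fun q => checkRule rules page q))) := by
  rw [PySem.List.foldl_pyRange_zero_pyGetD task 0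
    (fun acc page => acc ++ [(page, (PySem.List.pyRange 0 (PySem.List.len task)).foldl
      (fun acc2 potentialNextPage =>
        if checkRule rules page (PySem.List.pyGetD task potentialNextPage 0)
        then acc2 ++ [PySem.List.pyGetD task potentialNextPage 0] else acc2) [])]) []]
  rw [PySem.List.foldl_append_singleton_eq_map]
  simp only [innerA, List.nil_append]

def countD (task : List Int) : PySem.Dict Int Int :=
  task.foldl (fun d p => d.insert p (d.getD p 0 + 1)) PySem.Dict.empty

def succD (rules : List (List Int)) : PySem.Dict Int (PySem.Set Int) :=
  rules.foldl (fun d r =>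
    d.insert (PySem.List.pyGetD r 0 0)
      (PySem.Set.add (d.getD (PySem.List.pyGetD r 0 0) PySem.Set.empty)
        (PySem.List.pyGetD r 1 0))) PySem.Dict.empty

lemma key_eq (rules : List (List Int)) (task : List Int) (h : ∀ r ∈ rules, 2 ≤ r.length) (p : Int) :
    (((succD rules).getD p PySem.Set.empty).map (fun b => (countD task).getD b 0)).sum
    = ((task.filter (fun q => checkRule rules p q)).length : Int) := by
  rw [show (succD rules).getD p PySem.Set.empty
      = PySem.Set.ofList (succList rules p) from by
    rw [succD, succ_fold rules PySem.Dict.empty p, PySem.Set.ofList_eq_foldl]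
    rfl]
  rw [show (fun b => (countD task).getD b 0) = (fun b => ((task.count b : Nat) : Int)) from by
    funext b
    rw [countD, PySem.Dict.getD_foldl_insert_add_one]
    simp]
  rw [sum_count_eq_countP _ (PySem.Set.nodup_ofList _) task]
  have hiff : ∀ q : Int, q ∈ PySem.Set.ofList (succList rules p) ↔ checkRule rules p q = true := by
    intro q
    rw [PySem.Set.mem_ofList, check_iff rules p q h]
    simp only [succList, List.mem_map, List.mem_filter, decide_eq_true_eq]
    constructor
    · rintro ⟨r, ⟨hr, hf⟩, ht⟩
      exact ⟨r, hr, hf, ht⟩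
    · rintro ⟨r, hr, hf, ht⟩
      exact ⟨r, ⟨hr, hf⟩, ht⟩
  have hcong : task.countP (fun q => decide (q ∈ PySem.Set.ofList (succList rules p)))
      = task.countP (fun q => checkRule rules p q) := by
    refine List.countP_congr (fun q _ => ?_)
    simp only [decide_eq_true_eq]
    exact hiff q
  rw [hcong]
  simp [List.countP_eq_length_filter]

-- ===== VERDICT (by name: the statement is the Claim_ definition above) =====
theorem correctPrintingTask_spec : Claim_equal_correctPrintingTask := by
  intro rules task hdom hpre
  unfold Spec_correctPrintingTask
  simp only [correctPrintingTask, correctPrintingTask_alt]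
  rw [optionsA]
  rw [sorted_map_comm (fun page => (page, task.filter fun q => checkRule rules page q))
    (fun x => (x.2.length : Int)) task]
  rw [List.map_map]
  rw [show Prod.fst ∘ (fun page => (page, task.filter fun q => checkRule rules page q)) = id from rfl,
    List.map_id]
  congr 1
  funext p
  exact (key_eq rules task hpre p).symm
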